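-- pv_equiv track=rewrite | github.com/ppakorn/dotaIsDown | Codewars/4kyu/[undone]skyscraper4x4.py | reorder_clue
-- ===== SOURCE A (Python) =====
-- def reorder_clue(clues):
--     order = [4, 1, 3, 2]
--     reorder = []
--     for o in order:
--         for idx, clue in enumerate(clues):
--             if clue == o:
--                 reorder.append((idx, clue))
--     return reorder
-- ===== SOURCE B (Python) =====
-- def reorder_clue(clues):
--     buckets = {}
--     for idx, clue in enumerate(clues):
--         buckets.setdefault(clue, []).append((idx, clue))
--     out = []
--     for v in (4, 1, 3, 2):
--         out += buckets.get(v, [])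
--     return out
-- ===== Notes on version B (the rewrite author's own statement) =====
-- stated objective: alternative
-- what changed: A rescans the whole list once per target value (4 nested passes); B buckets all (idx, clue) pairs by value into a dict in a single pass and then concatenates the buckets for 4,1,3,2.
import Mathlib
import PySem

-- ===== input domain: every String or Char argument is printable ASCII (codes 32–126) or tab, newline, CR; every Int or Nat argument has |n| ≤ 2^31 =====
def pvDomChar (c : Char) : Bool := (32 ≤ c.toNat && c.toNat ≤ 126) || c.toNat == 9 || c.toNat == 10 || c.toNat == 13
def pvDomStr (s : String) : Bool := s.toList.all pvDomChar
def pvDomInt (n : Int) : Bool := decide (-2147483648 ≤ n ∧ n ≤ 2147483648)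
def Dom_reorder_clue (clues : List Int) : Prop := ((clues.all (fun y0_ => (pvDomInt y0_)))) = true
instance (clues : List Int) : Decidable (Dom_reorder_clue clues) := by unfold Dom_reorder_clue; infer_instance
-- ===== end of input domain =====

-- B replaces A's four full rescans (one per value in [4,1,3,2]) by a single
-- bucketing pass over enumerate(clues) followed by concatenating the four buckets.

-- ===== PORT A =====
def reorder_clue (clues : List Int) : List (Int × Int) :=
  let order : List Int := [4, 1, 3, 2]
  order.foldl (fun reorder o =>
    (PySem.List.enumerate clues).foldl (fun acc p =>
      if p.2 == o then acc ++ [p] else acc) reorder) []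

-- ===== PORT B =====
def reorder_clue_alt (clues : List Int) : List (Int × Int) :=
  let buckets : PySem.Dict Int (List (Int × Int)) :=
    (PySem.List.enumerate clues).foldl
      (fun d p => d.modify p.2 [] (· ++ [p])) PySem.Dict.empty
  ([4, 1, 3, 2] : List Int).foldl (fun out v => out ++ buckets.getD v []) []

-- ===== PRECONDITION & SPEC =====
def Spec_reorder_clue (clues : List Int) (out : List (Int × Int)) : Prop := out = reorder_clue_alt clues
instance (clues : List Int) (out : List (Int × Int)) : Decidable (Spec_reorder_clue clues out) := by unfold Spec_reorder_clue; infer_instance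

-- ===== CLAIM (what is proved, stated in full; the proofs are below) =====
def Claim_equal_reorder_clue : Prop := ∀ (clues : List Int), Dom_reorder_clue clues → Spec_reorder_clue clues (reorder_clue clues)

-- ===== LEMMAS AND PROOFS =====

-- the bucket for value c collects, in order, exactly the enumerate pairs whose clue is c
theorem bucket_getD (l : List (Int × Int)) (d : PySem.Dict Int (List (Int × Int))) (c : Int) :
    (l.foldl (fun d p => d.modify p.2 [] (· ++ [p])) d).getD c []
      = d.getD c [] ++ l.filter (fun p => p.2 == c) := by
  induction l generalizing d with
  | nil => simp
  | cons p t ih =>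
    simp only [List.foldl_cons, ih, List.filter_cons, PySem.Dict.getD_modify]
    by_cases h : c = p.2
    · simp [h]
    · simp [h, Ne.symm h]

theorem reorder_clue_spec : Claim_equal_reorder_clue := by
  intro clues _
  unfold Spec_reorder_clue reorder_clue reorder_clue_alt
  simp only [PySem.List.foldl_append_if_eq_filter, bucket_getD,
    PySem.Dict.getD_empty, List.nil_append]
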